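-- pv_equiv track=rewrite | github.com/lyttttt3333/diffusion_v2 | diffusion_policy_code/d3fields_dev/d3fields/utils/instruction_generate/check_func.py | middle_row_check
-- ===== SOURCE A (Python) =====
-- def middle_row_check(info):
--     first_row = False
--     middle_row = False
--     last_row = False
--     for i in [0,1,2,3]:
--         if i in info["free_list"]:
--             first_row = True
--             break
--     for i in [4,5,6,7]:
--         if i in info["free_list"]:
--             middle_row = True
--             break
--     for i in [8,9,10,11]:
--         if i in info["free_list"]:
--             last_row = True
--             break
--     if first_row and middle_row and last_row:
--         return True
--     else:
--         return False
-- ===== SOURCE B (Python) =====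
-- def middle_row_check(info):
--     covered = set()
--     for v in info["free_list"]:
--         if v in (0, 1, 2, 3):
--             covered.add(0)
--         elif v in (4, 5, 6, 7):
--             covered.add(1)
--         elif v in (8, 9, 10, 11):
--             covered.add(2)
--     return {0, 1, 2} <= covered
-- ===== Notes on version B (the rewrite author's own statement) =====
-- stated objective: alternative
-- what changed: B makes one pass over the data (free_list), classifying each element into a covered-rows set, instead of A's three probe loops over fixed index quadruples each scanning free_list.
import Mathlib
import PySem

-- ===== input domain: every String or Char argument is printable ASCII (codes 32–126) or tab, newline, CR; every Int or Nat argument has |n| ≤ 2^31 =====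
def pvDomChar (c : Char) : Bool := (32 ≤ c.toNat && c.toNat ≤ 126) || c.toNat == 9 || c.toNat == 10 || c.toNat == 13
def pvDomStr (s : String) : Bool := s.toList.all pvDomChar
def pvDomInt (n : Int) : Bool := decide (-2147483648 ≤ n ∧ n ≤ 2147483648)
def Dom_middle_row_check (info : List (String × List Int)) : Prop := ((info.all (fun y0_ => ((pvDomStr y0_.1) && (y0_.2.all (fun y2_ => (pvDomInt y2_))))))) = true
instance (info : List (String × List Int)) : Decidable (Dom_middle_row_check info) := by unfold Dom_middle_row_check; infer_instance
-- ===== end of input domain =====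

-- B replaces A's three fixed-index probe loops by one pass over free_list building a covered-rows set (alternative decomposition, same cost).


-- ===== PORT A =====
def middle_row_check (info : List (String × List Int)) : Bool :=
  match info.lookup "free_list" with
  | none => false   -- unreachable under Pre_ (Python raises KeyError)
  | some fl =>
    -- for i in [0,1,2,3]: if i in free_list: first_row = True; break
    let first_row := ([0, 1, 2, 3] : List Int).any (fun i => fl.contains i)
    let middle_row := ([4, 5, 6, 7] : List Int).any (fun i => fl.contains i)
    let last_row := ([8, 9, 10, 11] : List Int).any (fun i => fl.contains i)
    if first_row && middle_row && last_row then true else false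

-- ===== PORT B =====
def mrcAltStep (s : PySem.Set Int) (v : Int) : PySem.Set Int :=
  if v == 0 || v == 1 || v == 2 || v == 3 then PySem.Set.add s 0
  else if v == 4 || v == 5 || v == 6 || v == 7 then PySem.Set.add s 1
  else if v == 8 || v == 9 || v == 10 || v == 11 then PySem.Set.add s 2
  else s

def middle_row_check_alt (info : List (String × List Int)) : Bool :=
  match info.lookup "free_list" with
  | none => false   -- unreachable under Pre_ (Python raises KeyError)
  | some fl =>
    let covered := fl.foldl mrcAltStep PySem.Set.empty
    PySem.Set.issubset (PySem.Set.ofList [0, 1, 2]) covered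

-- ===== PRECONDITION & SPEC =====
-- Pre_: the dict must have the key "free_list"; both Pythons raise KeyError otherwise.
def Pre_middle_row_check (info : List (String × List Int)) : Prop :=
  (info.lookup "free_list").isSome
instance (info : List (String × List Int)) : Decidable (Pre_middle_row_check info) := by
  unfold Pre_middle_row_check; infer_instance
def pvWitness_middle_row_check : (List (String × List Int)) := [("free_list", [0, 5, 9])]

def Spec_middle_row_check (info : List (String × List Int)) (out : Bool) : Prop := out = middle_row_check_alt info
instance (info : List (String × List Int)) (out : Bool) : Decidable (Spec_middle_row_check info out) := by unfold Spec_middle_row_check; infer_instance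

-- ===== CLAIM (what is proved, stated in full; the proofs are below) =====
def Claim_equal_middle_row_check : Prop := ∀ (info : List (String × List Int)), Dom_middle_row_check info → Pre_middle_row_check info → Spec_middle_row_check info (middle_row_check info)

-- ===== LEMMAS AND PROOFS =====
theorem mem_step (s : PySem.Set Int) (v r : Int) (hr : r = 0 ∨ r = 1 ∨ r = 2) :
    r ∈ mrcAltStep s v ↔ r ∈ s ∨ (v = 4 * r ∨ v = 4 * r + 1 ∨ v = 4 * r + 2 ∨ v = 4 * r + 3) := by
  unfold mrcAltStep
  split_ifs with h1 h2 h3 <;>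
    simp only [PySem.Set.mem_add, Bool.or_eq_true, beq_iff_eq] at * <;>
    rcases hr with rfl | rfl | rfl <;>
    norm_num <;> first | tauto | (intro h; exfalso; omega)

theorem mem_foldl_step (fl : List Int) (s : PySem.Set Int) (r : Int) (hr : r = 0 ∨ r = 1 ∨ r = 2) :
    (r ∈ fl.foldl mrcAltStep s) ↔ r ∈ s ∨ ∃ v ∈ fl, (v = 4 * r ∨ v = 4 * r + 1 ∨ v = 4 * r + 2 ∨ v = 4 * r + 3) := by
  induction fl generalizing s with
  | nil => simp
  | cons v t ih =>
    rw [List.foldl_cons, ih, mem_step s v r hr]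
    simp only [List.mem_cons]
    constructor
    · rintro ((h | h) | ⟨w, hw, hP⟩)
      · exact Or.inl h
      · exact Or.inr ⟨v, Or.inl rfl, h⟩
      · exact Or.inr ⟨w, Or.inr hw, hP⟩
    · rintro (h | ⟨w, (rfl | hw), hP⟩)
      · exact Or.inl (Or.inl h)
      · exact Or.inl (Or.inr hP)
      · exact Or.inr ⟨w, hw, hP⟩

theorem middle_row_check_spec : Claim_equal_middle_row_check := by
  intro info _ hpre
  unfold Spec_middle_row_check middle_row_check middle_row_check_alt
  unfold Pre_middle_row_check at hpre
  cases hfl : info.lookup "free_list" with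
  | none => rw [hfl] at hpre
  | some fl =>
    have hite : ∀ b : Bool, (if b then true else false) = b := fun b => by cases b <;> rfl
    simp only [hite]
    rw [Bool.eq_iff_iff]
    simp only [PySem.Set.issubset_iff, PySem.Set.mem_ofList, Bool.and_eq_true,
      List.any_eq_true, List.contains_eq_mem, decide_eq_true_eq]
    constructor
    · rintro ⟨⟨⟨a, ha, hma⟩, b, hb, hmb⟩, c, hc, hmc⟩ x hx
      simp only [List.mem_cons, List.not_mem_nil, or_false] at hx
      rcases hx with rfl | rfl | rfl
      · rw [mem_foldl_step _ _ _ (Or.inl rfl)]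
        exact Or.inr ⟨a, hma, by simp at ha; omega⟩
      · rw [mem_foldl_step _ _ _ (Or.inr (Or.inl rfl))]
        exact Or.inr ⟨b, hmb, by simp at hb; omega⟩
      · rw [mem_foldl_step _ _ _ (Or.inr (Or.inr rfl))]
        exact Or.inr ⟨c, hmc, by simp at hc; omega⟩
    · intro h
      have h0 := h 0 (by simp)
      have h1 := h 1 (by simp)
      have h2 := h 2 (by simp)
      rw [mem_foldl_step _ _ _ (Or.inl rfl)] at h0
      rw [mem_foldl_step _ _ _ (Or.inr (Or.inl rfl))] at h1
      rw [mem_foldl_step _ _ _ (Or.inr (Or.inr rfl))] at h2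
      simp only [PySem.Set.empty, List.not_mem_nil, false_or] at h0 h1 h2
      obtain ⟨a, hma, ha⟩ := h0
      obtain ⟨b, hmb, hb⟩ := h1
      obtain ⟨c, hmc, hc⟩ := h2
      exact ⟨⟨⟨a, by simp; omega, hma⟩, b, by simp; omega, hmb⟩, c, by simp; omega, hmc⟩
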